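-- pv_equiv track=rewrite | github.com/Laksh47/aoc2k22 | dec7/tree.py | get_cmds
-- ===== SOURCE A (Python) =====
-- def get_cmds(lines):
--     cmds, output = [], []
--     for line in lines:
--         if line.startswith('$'):
--             if output:
--                 cmds.append(output)
--             output = line[1:].strip().split()
--         else:
--             output.append(line.strip())
--
--     if output:
--         cmds.append(output)
--
--     return cmds
-- ===== SOURCE B (Python) =====
-- def get_cmds(lines):
--     n = len(lines)
--     res = []
--     # boundary indices: positions of '$' lines
--     j = 0
--     while j < n and not lines[j].startswith('$'):
--         j += 1
--     lead = [l.strip() for l in lines[:j]]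
--     if lead:
--         res.append(lead)
--     i = j
--     while i < n:
--         j = i + 1
--         while j < n and not lines[j].startswith('$'):
--             j += 1
--         group = lines[i][1:].strip().split() + [l.strip() for l in lines[i+1:j]]
--         if group:
--             res.append(group)
--         i = j
--     return res
-- ===== Notes on version B (the rewrite author's own statement) =====
-- stated objective: alternative
-- what changed: Replaces A's stateful single-pass accumulator (running output buffer flushed on each '$' line) with explicit segmentation: scan to the '$' boundaries and build each group independently from its segment (command tokens plus following stripped output lines), keeping the leading non-'$' block as an implicit segment.
import Mathlib
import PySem

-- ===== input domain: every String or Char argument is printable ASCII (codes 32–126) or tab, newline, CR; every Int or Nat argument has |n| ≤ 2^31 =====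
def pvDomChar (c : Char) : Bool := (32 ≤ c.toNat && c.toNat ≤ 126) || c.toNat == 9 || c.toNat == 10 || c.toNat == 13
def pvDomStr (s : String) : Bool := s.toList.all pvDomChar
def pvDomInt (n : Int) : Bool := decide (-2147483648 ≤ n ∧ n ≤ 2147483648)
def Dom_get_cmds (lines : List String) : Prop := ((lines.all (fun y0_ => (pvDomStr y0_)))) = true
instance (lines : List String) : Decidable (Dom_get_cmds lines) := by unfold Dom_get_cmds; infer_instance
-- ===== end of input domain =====

-- B replaces A's stateful single-pass accumulator by explicit '$'-boundary segmentation: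
-- leading non-'$' block, then per-'$' segments built independently (objective: alternative decomposition).


-- ===== PORT A =====
-- line[1:].strip().split()
def pvTokens (l : String) : List String :=
  PySem.Str.split₀ (PySem.Str.strip (PySem.Str.slice l (some 1) none))

-- A's loop state is (cmds, output); the loop body is a literal transcription of A's branches.
def get_cmds (lines : List String) : List (List String) :=
  let s := lines.foldl
    (fun (st : List (List String) × List String) line =>
      if PySem.Str.startswith line "$" then
        ((if st.2 ≠ [] then st.1 ++ [st.2] else st.1), pvTokens line)
      else
        (st.1, st.2 ++ [PySem.Str.strip line]))
    ([], [])
  if s.2 ≠ [] then s.1 ++ [s.2] else s.1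

-- ===== PORT B =====
def pvIsCmd (l : String) : Bool := PySem.Str.startswith l "$"

-- groups for the tail that begins at a '$' boundary (or is empty)
def pvSegGroups : List String → List (List String)
  | [] => []
  | l :: rest =>
    let outs := rest.takeWhile (fun x => !pvIsCmd x)
    let rest' := rest.dropWhile (fun x => !pvIsCmd x)
    let group := pvTokens l ++ outs.map PySem.Str.strip
    (if group ≠ [] then [group] else []) ++ pvSegGroups rest'
termination_by ls => ls.length
decreasing_by
  simpa using Nat.lt_succ_of_le (List.length_dropWhile_le _ _)

def get_cmds_alt (lines : List String) : List (List String) :=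
  let lead := (lines.takeWhile (fun x => !pvIsCmd x)).map PySem.Str.strip
  (if lead ≠ [] then [lead] else []) ++
    pvSegGroups (lines.dropWhile (fun x => !pvIsCmd x))

-- ===== PRECONDITION & SPEC =====
def Spec_get_cmds (lines : List String) (out : List (List String)) : Prop := out = get_cmds_alt lines
instance (lines : List String) (out : List (List String)) : Decidable (Spec_get_cmds lines out) := by unfold Spec_get_cmds; infer_instance

-- ===== CLAIM (what is proved, stated in full; the proofs are below) =====
def Claim_equal_get_cmds : Prop := ∀ (lines : List String), Dom_get_cmds lines → Spec_get_cmds lines (get_cmds lines)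

-- ===== LEMMAS AND PROOFS =====

theorem pvSegGroups_nil : pvSegGroups [] = [] := by
  rw [pvSegGroups.eq_def]

theorem pvSegGroups_cons (l : String) (rest : List String) :
    pvSegGroups (l :: rest) =
      (if (pvTokens l ++ (rest.takeWhile (fun x => !pvIsCmd x)).map PySem.Str.strip) ≠ []
        then [pvTokens l ++ (rest.takeWhile (fun x => !pvIsCmd x)).map PySem.Str.strip] else [])
      ++ pvSegGroups (rest.dropWhile (fun x => !pvIsCmd x)) := by
  rw [pvSegGroups.eq_def]

-- B's answer for remaining lines, given pending output already accumulated
def pvRest (output : List String) (lines : List String) : List (List String) :=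
  let g := output ++ (lines.takeWhile (fun x => !pvIsCmd x)).map PySem.Str.strip
  (if g ≠ [] then [g] else []) ++ pvSegGroups (lines.dropWhile (fun x => !pvIsCmd x))

-- the loop invariant: running A's loop from state (cmds, output) then flushing equals cmds ++ pvRest output lines
theorem pvInvariant (lines : List String) (cmds : List (List String)) (output : List String) :
    (let s := lines.foldl
      (fun (st : List (List String) × List String) line =>
        if PySem.Str.startswith line "$" then
          ((if st.2 ≠ [] then st.1 ++ [st.2] else st.1), pvTokens line)
        else
          (st.1, st.2 ++ [PySem.Str.strip line]))
      (cmds, output)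
     if s.2 ≠ [] then s.1 ++ [s.2] else s.1)
    = cmds ++ pvRest output lines := by
  induction lines generalizing cmds output with
  | nil =>
    simp only [List.foldl_nil, pvRest, List.takeWhile_nil, List.map_nil, List.append_nil,
      List.dropWhile_nil, pvSegGroups_nil, ne_eq, ite_not]
    split_ifs <;> simp
  | cons l rest ih =>
    by_cases h : PySem.Str.startswith l "$"
    · have hc : pvIsCmd l = true := h
      simp only [List.foldl_cons, h, if_pos]
      rw [ih]
      simp only [pvRest, List.takeWhile, List.dropWhile, hc, Bool.not_true, pvSegGroups_cons]
      split_ifs <;> simp_all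
    · have hc : pvIsCmd l = false := by
        simpa [pvIsCmd] using h
      simp only [List.foldl_cons, h]
      rw [ih]
      simp [pvRest, List.takeWhile, List.dropWhile, hc]

-- ===== VERDICT (by name: the statement is the Claim_ definition above) =====
theorem get_cmds_spec : Claim_equal_get_cmds := by
  intro lines _
  show get_cmds lines = get_cmds_alt lines
  have h := pvInvariant lines [] []
  simpa [get_cmds, get_cmds_alt, pvRest] using h
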